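-- pv_equiv track=rewrite | github.com/Sadeeptha-B/Advanced-Algorithms | 30769140/q2/bwtunzip.py | __parse_byte
-- ===== SOURCE A (Python) =====
-- def __parse_byte(byte_tup):
--     zeros, num = byte_tup
--     bitarray = []
--
--     for _ in range(zeros):
--         bitarray.append(0)
--
--     shift_bit = num.bit_length() - 1
--
--     for _ in range(num.bit_length()):
--         start = num >> shift_bit
--         lsb = start % 2
--         bitarray.append(lsb)
--         shift_bit -= 1
--
--     return bitarray
-- ===== SOURCE B (Python) =====
-- def __parse_byte(byte_tup):
--     zeros, num = byte_tup
--     s = bin(num)[2:] if num else ''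
--     return [0] * zeros + [int(c) for c in s]
-- ===== Notes on version B (the rewrite author's own statement) =====
-- stated objective: idiomatic
-- what changed: Replaces the MSB-first shift/modulo loop with a running shift_bit index by the library binary conversion bin(num)[2:] mapped to digits, prepended with [0]*zeros.
-- outside the precondition, e.g. on __parse_byte((0, -2)): A returns [1, 0], B raises ValueError
import Mathlib
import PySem

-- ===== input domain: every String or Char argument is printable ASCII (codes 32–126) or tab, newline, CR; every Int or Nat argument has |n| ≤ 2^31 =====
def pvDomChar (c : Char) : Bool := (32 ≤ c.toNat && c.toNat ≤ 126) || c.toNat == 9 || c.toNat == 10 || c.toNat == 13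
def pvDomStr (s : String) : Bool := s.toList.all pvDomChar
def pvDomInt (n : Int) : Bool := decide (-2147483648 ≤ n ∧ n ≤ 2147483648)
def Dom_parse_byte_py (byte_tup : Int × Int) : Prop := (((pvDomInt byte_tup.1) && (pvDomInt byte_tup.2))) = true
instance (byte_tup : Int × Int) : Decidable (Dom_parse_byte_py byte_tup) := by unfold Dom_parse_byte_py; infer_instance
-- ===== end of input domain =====

-- B replaces A's MSB-first shift/modulo loop (running shift_bit index) by a direct
-- binary conversion (bin(num)[2:] mapped to digits) appended to [0]*zeros; objective: idiomatic.

-- ===== PORT A =====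
def parse_byte_py (byte_tup : Int × Int) : List Int :=
  let zeros := byte_tup.1
  let num := byte_tup.2
  -- bitarray = []; for _ in range(zeros): bitarray.append(0)
  let bitarray : List Int := (PySem.List.pyRange 0 zeros 1).foldl (fun acc _ => acc ++ [(0 : Int)]) []
  -- shift_bit = num.bit_length() - 1; loop over range(num.bit_length())
  let bl := PySem.Int.bitLength num
  let st := (PySem.List.pyRange 0 (bl : Int) 1).foldl
    (fun (st : List Int × Int) _ =>
      let start := num >>> st.2.toNat        -- num >> shift_bit (Python arithmetic shift)
      let lsb := PySem.Int.mod start 2       -- start % 2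
      (st.1 ++ [lsb], st.2 - 1))             -- bitarray.append(lsb); shift_bit -= 1
    (bitarray, (bl : Int) - 1)
  st.1

-- ===== PORT B =====
-- port of bin(num)[2:] followed by [int(c) for c in s]: the binary digits of n, MSB first
def pyBits : Nat → List Int
  | 0 => []
  | n + 1 => pyBits ((n + 1) / 2) ++ [(((n + 1) % 2 : Nat) : Int)]
decreasing_by exact Nat.div_lt_self (Nat.succ_pos n) (by omega)

def parse_byte_py_alt (byte_tup : Int × Int) : List Int :=
  let zeros := byte_tup.1
  let num := byte_tup.2
  -- s = bin(num)[2:] if num else ''   (digits directly, as Ints)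
  let s : List Int := if num ≠ 0 then pyBits num.toNat else []
  -- [0] * zeros + s
  List.replicate zeros.toNat (0 : Int) ++ s

-- ===== PRECONDITION & SPEC =====
-- Pre_ restricts num to the natural domain (non-negative counts produced by the encoder):
-- on num < 0 A still returns arithmetic-shift bits, but B's bin(num)[2:] raises ValueError there.
def Pre_parse_byte_py (byte_tup : Int × Int) : Prop := 0 ≤ byte_tup.2
instance (byte_tup : Int × Int) : Decidable (Pre_parse_byte_py byte_tup) := by unfold Pre_parse_byte_py; infer_instance
def pvWitness_parse_byte_py : (Int × Int) := (2, 5)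

def Spec_parse_byte_py (byte_tup : Int × Int) (out : List Int) : Prop := out = parse_byte_py_alt byte_tup
instance (byte_tup : Int × Int) (out : List Int) : Decidable (Spec_parse_byte_py byte_tup out) := by unfold Spec_parse_byte_py; infer_instance

-- ===== CLAIM (what is proved, stated in full; the proofs are below) =====
def Claim_equal_parse_byte_py : Prop := ∀ (byte_tup : Int × Int), Dom_parse_byte_py byte_tup → Pre_parse_byte_py byte_tup → Spec_parse_byte_py byte_tup (parse_byte_py byte_tup)

-- ===== LEMMAS AND PROOFS =====

-- a fold that ignores the list elements is an iterate of its step over the length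
theorem foldl_ignore_iterate {α β : Type} (g : α → α) :
    ∀ (l : List β) (init : α), l.foldl (fun s _ => g s) init = g^[l.length] init := by
  intro l
  induction l with
  | nil => intro init; simp
  | cons x xs ih =>
      intro init
      simp [List.foldl_cons, ih, Function.iterate_succ_apply]

theorem iterate_append_zero : ∀ (k : Nat) (acc : List Int),
    (fun acc => acc ++ [(0 : Int)])^[k] acc = acc ++ List.replicate k (0 : Int) := by
  intro k
  induction k with
  | zero => intro acc; simp
  | succ k ih =>
      intro acc
      rw [Function.iterate_succ_apply, ih]
      simp [List.replicate_succ, List.append_assoc]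

-- low m bits of n, MSB first (what A's second loop appends)
def lowBits (n : Int) : Nat → List Int
  | 0 => []
  | m + 1 => PySem.Int.mod (n >>> m) 2 :: lowBits n m

theorem iterate_loop (num : Int) :
    ∀ (m : Nat) (acc : List Int),
      (fun (st : List Int × Int) =>
        (st.1 ++ [PySem.Int.mod (num >>> st.2.toNat) 2], st.2 - 1))^[m] (acc, (m : Int) - 1)
      = (acc ++ lowBits num m, -1) := by
  intro m
  induction m with
  | zero => intro acc; simp [lowBits]
  | succ m ih =>
      intro acc
      rw [Function.iterate_succ_apply]
      have h1 : ((((m : Int) + 1) - 1).toNat) = m := by omega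
      have h2 : ((m : Int) + 1 - 1 - 1) = (m : Int) - 1 := by ring
      push_cast
      simp only [h1, h2]
      rw [ih]
      simp [lowBits, List.append_assoc]

theorem natCast_shiftRight (n k : Nat) : ((n : Int) >>> k) = ((n >>> k : Nat) : Int) := by
  simp [Int.shiftRight_eq_div_pow, Nat.shiftRight_eq_div_pow]

theorem lowBits_split (n : Nat) :
    ∀ m, lowBits (n : Int) (m + 1) = lowBits ((n / 2 : Nat) : Int) m ++ [((n % 2 : Nat) : Int)] := by
  intro m
  induction m with
  | zero =>
      simp [lowBits]
  | succ m ih =>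
      have hsh : ((n : Int) >>> (m + 1)) = (((n / 2 : Nat) : Int) >>> m) := by
        rw [natCast_shiftRight, natCast_shiftRight]
        congr 1
        rw [Nat.add_comm, Nat.shiftRight_add, Nat.shiftRight_one]
      show PySem.Int.mod ((n : Int) >>> (m + 1)) 2 :: lowBits (n : Int) (m + 1)
        = PySem.Int.mod (((n / 2 : Nat) : Int) >>> m) 2 :: lowBits ((n / 2 : Nat) : Int) m
          ++ [((n % 2 : Nat) : Int)]
      rw [ih, hsh]
      simp

theorem lowBits_bitLength (n : Nat) : lowBits (n : Int) (PySem.Int.bitLength (n : Int)) = pyBits n := by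
  induction n using Nat.strong_induction_on with
  | _ n ih =>
      match n, ih with
      | 0, _ => simp [lowBits, pyBits, PySem.Int.bitLength_zero]
      | (k + 1), ih =>
          rw [PySem.Int.bitLength_natCast (Nat.succ_pos k)]
          rw [lowBits_split (k + 1)]
          rw [ih ((k + 1) / 2) (Nat.div_lt_self (Nat.succ_pos k) (by omega))]
          rw [pyBits]

-- ===== VERDICT (by name: the statement is the Claim_ definition above) =====
theorem parse_byte_py_spec : Claim_equal_parse_byte_py := by
  intro t _hdom hpre
  obtain ⟨zeros, num⟩ := t
  simp only [Pre_parse_byte_py] at hpre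
  show parse_byte_py (zeros, num) = parse_byte_py_alt (zeros, num)
  unfold parse_byte_py parse_byte_py_alt
  simp only []
  rw [foldl_ignore_iterate, foldl_ignore_iterate]
  rw [PySem.List.length_pyRange_one, PySem.List.length_pyRange_one]
  rw [iterate_append_zero]
  have hz : ((zeros : Int) - 0).toNat = zeros.toNat := by omega
  have hnum : num = (num.toNat : Int) := by omega
  have hbl : ((PySem.Int.bitLength num : Int) - 0).toNat = PySem.Int.bitLength num := by omega
  rw [hz, hbl]
  rw [iterate_loop num (PySem.Int.bitLength num)
    (List.nil ++ List.replicate zeros.toNat 0)]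
  rw [List.nil_append]
  by_cases h : num = 0
  · subst h; simp [lowBits, PySem.Int.bitLength_zero]
  · rw [if_pos h]
    conv_lhs => rw [hnum]
    show List.replicate zeros.toNat (0 : Int) ++
        lowBits ((num.toNat : Int)) (PySem.Int.bitLength ((num.toNat : Int)))
      = List.replicate zeros.toNat (0 : Int) ++ pyBits num.toNat
    rw [lowBits_bitLength]
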